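-- pv_equiv track=rewrite | github.com/sutazai/sutazaiapp | scripts/utils/external-service-discovery.py | _identify_service_type
-- ===== SOURCE A (Python) =====
-- from typing import Dict, List, Any
--
-- def _identify_service_type(container_info: Dict[str, Any]) -> str:
--     """Identify service type from container info"""
--     image = container_info['image'].lower()
--
--     # Database services
--     if any(db in image for db in ['postgres', 'mysql', 'mariadb', 'mongo', 'cassandra', 'redis']):
--         return 'database'
--
--     # Message queues
--     if any(mq in image for mq in ['rabbitmq', 'kafka', 'activemq', 'nats']):
--         return 'message_queue'
--
--     # Web services
--     if any(web in image for web in ['nginx', 'apache', 'httpd', 'caddy']):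
--         return 'web_server'
--
--     # Monitoring
--     if any(mon in image for mon in ['prometheus', 'grafana', 'elastic', 'kibana']):
--         return 'monitoring'
--
--     return 'unknown'
-- ===== SOURCE B (Python) =====
-- _KEYWORD_PRIORITY = {
--     'postgres': 0, 'mysql': 0, 'mariadb': 0, 'mongo': 0, 'cassandra': 0, 'redis': 0,
--     'rabbitmq': 1, 'kafka': 1, 'activemq': 1, 'nats': 1,
--     'nginx': 2, 'apache': 2, 'httpd': 2, 'caddy': 2,
--     'prometheus': 3, 'grafana': 3, 'elastic': 3, 'kibana': 3,
-- }
-- _LABELS = ['database', 'message_queue', 'web_server', 'monitoring']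
--
-- def _identify_service_type(container_info):
--     """Identify service type by sliding every 4..10-char window of the image
--     name through a keyword->priority hash index, keeping the best priority."""
--     image = container_info['image'].lower()
--     n = len(image)
--     best = None
--     for i in range(n):
--         for j in range(i + 4, min(i + 10, n) + 1):
--             p = _KEYWORD_PRIORITY.get(image[i:j])
--             if p is not None and (best is None or p < best):
--                 best = p
--     return _LABELS[best] if best is not None else 'unknown'
-- ===== Notes on version B (the rewrite author's own statement) =====
-- stated objective: alternative
-- what changed: Instead of testing each keyword for containment in the image string, B slides every 4..10-character window of the lowered image through a keyword-to-priority hash index once and returns the label of the minimum priority found, so the per-keyword substring search disappears.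
import Mathlib
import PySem

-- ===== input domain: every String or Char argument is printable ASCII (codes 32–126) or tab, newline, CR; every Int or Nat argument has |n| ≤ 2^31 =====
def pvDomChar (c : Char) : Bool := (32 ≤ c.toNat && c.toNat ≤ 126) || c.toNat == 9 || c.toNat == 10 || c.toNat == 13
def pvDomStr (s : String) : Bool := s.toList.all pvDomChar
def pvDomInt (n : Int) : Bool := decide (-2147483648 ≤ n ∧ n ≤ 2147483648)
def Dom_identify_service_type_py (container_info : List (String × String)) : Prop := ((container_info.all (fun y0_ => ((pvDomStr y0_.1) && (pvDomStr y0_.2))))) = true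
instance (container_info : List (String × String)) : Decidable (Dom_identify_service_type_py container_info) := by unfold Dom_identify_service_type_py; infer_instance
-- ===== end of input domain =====

-- B classifies by sliding every 4..10-character window of the lowered image through a
-- keyword->priority hash index and returning the label of the minimum priority found,
-- instead of A's per-keyword substring-containment tests (objective: alternative).


-- ===== PORT A =====
-- A-side helpers: A's four keyword groups, named (the literals of the Python source)
def pvGroupDB : List String := ["postgres", "mysql", "mariadb", "mongo", "cassandra", "redis"]
def pvGroupMQ : List String := ["rabbitmq", "kafka", "activemq", "nats"]
def pvGroupWEB : List String := ["nginx", "apache", "httpd", "caddy"]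
def pvGroupMON : List String := ["prometheus", "grafana", "elastic", "kibana"]

def identify_service_type_py (container_info : List (String × String)) : String :=
  match List.lookup "image" container_info with
  | none => ""   -- KeyError in Python; excluded by Pre_
  | some img0 =>
    let image := PySem.Str.lower img0
    if pvGroupDB.any (fun db => PySem.Str.isIn db image) then "database"
    else if pvGroupMQ.any (fun mq => PySem.Str.isIn mq image) then "message_queue"
    else if pvGroupWEB.any (fun web => PySem.Str.isIn web image) then "web_server"
    else if pvGroupMON.any (fun mon => PySem.Str.isIn mon image) then "monitoring"
    else "unknown"

-- ===== PORT B =====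
-- B-side helpers: the keyword -> priority index and the label table of Source B
def pvKwList : List (String × Int) :=
  [("postgres", 0), ("mysql", 0), ("mariadb", 0), ("mongo", 0), ("cassandra", 0), ("redis", 0),
   ("rabbitmq", 1), ("kafka", 1), ("activemq", 1), ("nats", 1),
   ("nginx", 2), ("apache", 2), ("httpd", 2), ("caddy", 2),
   ("prometheus", 3), ("grafana", 3), ("elastic", 3), ("kibana", 3)]

def pvKwPrio : PySem.Dict String Int := PySem.Dict.mk pvKwList

def pvLabels : List String := ["database", "message_queue", "web_server", "monitoring"]

-- the body of Source B's inner 'if p is not None and (best is None or p < best): best = p'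
def pvBestStep (best : Option Int) (w : String) : Option Int :=
  match pvKwPrio.get? w, best with
  | some p, none => some p
  | some p, some q => if p < q then some p else some q
  | none, b => b

def identify_service_type_py_alt (container_info : List (String × String)) : String :=
  match List.lookup "image" container_info with
  | none => ""   -- KeyError in Python; excluded by Pre_
  | some img0 =>
    let image := PySem.Str.lower img0
    let n : Int := PySem.Str.len image
    let best := (PySem.List.pyRange 0 n 1).foldl (fun b i =>
        (PySem.List.pyRange (i + 4) (min (i + 10) n + 1) 1).foldl (fun b j =>
          pvBestStep b (PySem.Str.slice image (some i) (some j))) b) none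
    match best with
    | some p => (PySem.List.pyGet? pvLabels p).getD ""   -- _LABELS[best]; p is always 0..3
    | none => "unknown"

-- ===== PRECONDITION & SPEC =====
-- Pre_ excludes exactly the dicts without an 'image' key, on which Python A raises KeyError.
def Pre_identify_service_type_py (container_info : List (String × String)) : Prop :=
  (List.lookup "image" container_info).isSome = true
instance (container_info : List (String × String)) : Decidable (Pre_identify_service_type_py container_info) := by unfold Pre_identify_service_type_py; infer_instance

def pvWitness_identify_service_type_py : (List (String × String)) := [("image", "nginx:latest")]

def Spec_identify_service_type_py (container_info : List (String × String)) (out : String) : Prop := out = identify_service_type_py_alt container_info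
instance (container_info : List (String × String)) (out : String) : Decidable (Spec_identify_service_type_py container_info out) := by unfold Spec_identify_service_type_py; infer_instance

-- ===== CLAIM (what is proved, stated in full; the proofs are below) =====
def Claim_equal_identify_service_type_py : Prop := ∀ (container_info : List (String × String)), Dom_identify_service_type_py container_info → Pre_identify_service_type_py container_info → Spec_identify_service_type_py container_info (identify_service_type_py container_info)

-- ===== LEMMAS AND PROOFS =====

-- the list of window strings B's two nested loops visit, flattened
def pvWindows (image : String) : List String :=
  (PySem.List.pyRange 0 (PySem.Str.len image) 1).flatMap (fun i =>
    (PySem.List.pyRange (i + 4) (min (i + 10) (PySem.Str.len image) + 1) 1).map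
      (fun j => PySem.Str.slice image (some i) (some j)))

def pvPrios (image : String) : List Int := (pvWindows image).filterMap pvKwPrio.get?

theorem pv_foldl_flatMap {α β γ : Type} (l : List α) (g : α → List β) (f : γ → β → γ)
    (init : γ) : (l.flatMap g).foldl f init = l.foldl (fun b a => (g a).foldl f b) init := by
  induction l generalizing init with
  | nil => rfl
  | cons a t ih => simp [List.flatMap_cons, List.foldl_append, ih]

theorem pv_best_some (ws : List String) (q : Int) :
    ws.foldl pvBestStep (some q) = some ((ws.filterMap pvKwPrio.get?).foldl min q) := by
  induction ws generalizing q with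
  | nil => rfl
  | cons w t ih =>
    cases h : pvKwPrio.get? w with
    | none => simp [List.foldl_cons, pvBestStep, h, ih]
    | some p =>
      have hstep : pvBestStep (some q) w = some (min q p) := by
        simp only [pvBestStep, h]
        split
        · exact congrArg some (by omega)
        · exact congrArg some (by omega)
      simp [List.foldl_cons, hstep, h, ih]

theorem pv_best_none (ws : List String) :
    ws.foldl pvBestStep none = (ws.filterMap pvKwPrio.get?).min? := by
  induction ws with
  | nil => rfl
  | cons w t ih =>
    cases h : pvKwPrio.get? w with
    | none =>
      have hstep : pvBestStep none w = none := by simp [pvBestStep, h]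
      simp [List.foldl_cons, hstep, h, ih]
    | some p =>
      have hstep : pvBestStep none w = some p := by simp [pvBestStep, h]
      rw [List.foldl_cons, hstep, pv_best_some, List.filterMap_cons, h]
      rfl

theorem pv_get?_mem (l : List (String × Int)) (w : String) (p : Int)
    (h : (PySem.Dict.mk l).get? w = some p) : (w, p) ∈ l := by
  induction l with
  | nil => simp [PySem.Dict.get?] at h
  | cons a t ih =>
    rw [PySem.Dict.get?_mk_cons] at h
    by_cases hb : (a.1 == w) = true
    · rw [if_pos hb] at h
      obtain rfl := beq_iff_eq.mp hb
      obtain rfl := Option.some.inj h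
      exact List.mem_cons_self ..
    · rw [if_neg hb] at h
      exact List.mem_cons_of_mem _ (ih h)

theorem pv_getKw (w : String) (p : Int) :
    pvKwPrio.get? w = some p ↔
      ((w ∈ pvGroupDB ∧ p = 0) ∨ (w ∈ pvGroupMQ ∧ p = 1) ∨
       (w ∈ pvGroupWEB ∧ p = 2) ∨ (w ∈ pvGroupMON ∧ p = 3)) := by
  constructor
  · intro h
    have hm := pv_get?_mem pvKwList w p h
    simp only [pvKwList, List.mem_cons, List.not_mem_nil, or_false, Prod.mk.injEq] at hm
    rcases hm with ⟨rfl, rfl⟩|⟨rfl, rfl⟩|⟨rfl, rfl⟩|⟨rfl, rfl⟩|⟨rfl, rfl⟩|⟨rfl, rfl⟩|⟨rfl, rfl⟩|⟨rfl, rfl⟩|⟨rfl, rfl⟩|⟨rfl, rfl⟩|⟨rfl, rfl⟩|⟨rfl, rfl⟩|⟨rfl, rfl⟩|⟨rfl, rfl⟩|⟨rfl, rfl⟩|⟨rfl, rfl⟩|⟨rfl, rfl⟩|⟨rfl, rfl⟩ <;>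
      decide
  · intro h
    rcases h with ⟨hw, rfl⟩ | ⟨hw, rfl⟩ | ⟨hw, rfl⟩ | ⟨hw, rfl⟩ <;>
      simp only [pvGroupDB, pvGroupMQ, pvGroupWEB, pvGroupMON, List.mem_cons,
        List.not_mem_nil, or_false] at hw <;>
      (rcases hw with rfl | rfl | rfl | rfl | rfl | rfl <;> rfl)

theorem pvWindows_fwd (image w : String) (h : w ∈ pvWindows image) :
    w.toList <:+: image.toList := by
  unfold pvWindows at h
  rw [List.mem_flatMap] at h
  obtain ⟨i, hi, hw⟩ := h
  rw [List.mem_map] at hw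
  obtain ⟨j, hj, rfl⟩ := hw
  rw [PySem.List.mem_pyRange_iff_of_pos (by norm_num)] at hi hj
  obtain ⟨hi0, _, -⟩ := hi
  obtain ⟨hj1, _, -⟩ := hj
  rw [PySem.Str.toList_slice, PySem.Chars.slice_eq_listSlice,
    PySem.List.slice_toNat _ hi0 (by omega)]
  exact ((List.take_prefix _ _).isInfix).trans ((List.drop_suffix _ _).isInfix)

theorem pvWindows_bwd (image k : String) (h : k.toList <:+: image.toList)
    (h4 : 4 ≤ k.toList.length) (h10 : k.toList.length ≤ 10) : k ∈ pvWindows image := by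
  obtain ⟨s, t, hst⟩ := h
  have hlen : s.length + k.toList.length + t.length = image.toList.length := by
    have := congrArg List.length hst
    simp only [List.length_append] at this
    omega
  unfold pvWindows
  rw [List.mem_flatMap]
  refine ⟨(s.length : Int), ?_, ?_⟩
  · rw [PySem.List.mem_pyRange_iff_of_pos (by norm_num), PySem.Str.len_eq]
    refine ⟨by positivity, by omega, one_dvd _⟩
  · rw [List.mem_map]
    refine ⟨(s.length : Int) + (k.toList.length : Int), ?_, ?_⟩
    · rw [PySem.List.mem_pyRange_iff_of_pos (by norm_num), PySem.Str.len_eq]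
      refine ⟨by omega, by omega, one_dvd _⟩
    · refine String.toList_inj.mp ?_
      rw [PySem.Str.toList_slice, PySem.Chars.slice_eq_listSlice,
        PySem.List.slice_natCast_add, ← hst, List.append_assoc, List.drop_left,
        List.take_left]

theorem pv_kw_len (k : String)
    (h : k ∈ pvGroupDB ++ pvGroupMQ ++ pvGroupWEB ++ pvGroupMON) :
    4 ≤ k.toList.length ∧ k.toList.length ≤ 10 := by
  simp only [pvGroupDB, pvGroupMQ, pvGroupWEB, pvGroupMON, List.mem_append, List.mem_cons,
    List.not_mem_nil, or_false] at h
  rcases h with (((rfl|rfl|rfl|rfl|rfl|rfl)|(rfl|rfl|rfl|rfl))|(rfl|rfl|rfl|rfl))|(rfl|rfl|rfl|rfl) <;>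
    decide

theorem pv_mem_prios (image : String) (p : Int) :
    p ∈ pvPrios image ↔
      ((p = 0 ∧ pvGroupDB.any (fun k => PySem.Str.isIn k image) = true) ∨
       (p = 1 ∧ pvGroupMQ.any (fun k => PySem.Str.isIn k image) = true) ∨
       (p = 2 ∧ pvGroupWEB.any (fun k => PySem.Str.isIn k image) = true) ∨
       (p = 3 ∧ pvGroupMON.any (fun k => PySem.Str.isIn k image) = true)) := by
  unfold pvPrios
  rw [List.mem_filterMap]
  constructor
  · rintro ⟨w, hw, hget⟩
    have hin : PySem.Str.isIn w image = true :=
      (PySem.Str.isIn_iff_infix _ _).mpr (pvWindows_fwd _ _ hw)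
    rcases (pv_getKw w p).mp hget with ⟨hm, rfl⟩ | ⟨hm, rfl⟩ | ⟨hm, rfl⟩ | ⟨hm, rfl⟩
    · exact Or.inl ⟨rfl, List.any_eq_true.mpr ⟨w, hm, hin⟩⟩
    · exact Or.inr (Or.inl ⟨rfl, List.any_eq_true.mpr ⟨w, hm, hin⟩⟩)
    · exact Or.inr (Or.inr (Or.inl ⟨rfl, List.any_eq_true.mpr ⟨w, hm, hin⟩⟩))
    · exact Or.inr (Or.inr (Or.inr ⟨rfl, List.any_eq_true.mpr ⟨w, hm, hin⟩⟩))
  · have build : ∀ (g : List String), g = pvGroupDB ∨ g = pvGroupMQ ∨ g = pvGroupWEB ∨ g = pvGroupMON →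
        g.any (fun k => PySem.Str.isIn k image) = true →
        ∃ w, w ∈ pvWindows image ∧ w ∈ g := by
      intro g hg hany
      obtain ⟨w, hwg, hwin⟩ := List.any_eq_true.mp hany
      have hmem : w ∈ pvGroupDB ++ pvGroupMQ ++ pvGroupWEB ++ pvGroupMON := by
        rcases hg with rfl | rfl | rfl | rfl <;> simp [List.mem_append, hwg]
      obtain ⟨hl4, hl10⟩ := pv_kw_len w hmem
      exact ⟨w, pvWindows_bwd _ _ ((PySem.Str.isIn_iff_infix _ _).mp hwin) hl4 hl10, hwg⟩
    rintro (⟨rfl, h⟩ | ⟨rfl, h⟩ | ⟨rfl, h⟩ | ⟨rfl, h⟩)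
    · obtain ⟨w, hW, hg⟩ := build _ (Or.inl rfl) h
      exact ⟨w, hW, (pv_getKw w 0).mpr (Or.inl ⟨hg, rfl⟩)⟩
    · obtain ⟨w, hW, hg⟩ := build _ (Or.inr (Or.inl rfl)) h
      exact ⟨w, hW, (pv_getKw w 1).mpr (Or.inr (Or.inl ⟨hg, rfl⟩))⟩
    · obtain ⟨w, hW, hg⟩ := build _ (Or.inr (Or.inr (Or.inl rfl))) h
      exact ⟨w, hW, (pv_getKw w 2).mpr (Or.inr (Or.inr (Or.inl ⟨hg, rfl⟩)))⟩
    · obtain ⟨w, hW, hg⟩ := build _ (Or.inr (Or.inr (Or.inr rfl))) h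
      exact ⟨w, hW, (pv_getKw w 3).mpr (Or.inr (Or.inr (Or.inr ⟨hg, rfl⟩)))⟩

theorem pv_nonneg_prios (image : String) (p : Int) (h : p ∈ pvPrios image) : 0 ≤ p := by
  rcases (pv_mem_prios image p).mp h with ⟨rfl, -⟩ | ⟨rfl, -⟩ | ⟨rfl, -⟩ | ⟨rfl, -⟩ <;> norm_num

-- ===== VERDICT (by name: the statement is the Claim_ definition above) =====
theorem identify_service_type_py_spec : Claim_equal_identify_service_type_py := by
  intro ci _ hpre
  unfold Pre_identify_service_type_py at hpre
  obtain ⟨img0, hv⟩ := Option.isSome_iff_exists.mp hpre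
  unfold Spec_identify_service_type_py identify_service_type_py identify_service_type_py_alt
  rw [hv]
  dsimp only
  set image := PySem.Str.lower img0 with himg
  have hfold :
      (PySem.List.pyRange 0 (PySem.Str.len image) 1).foldl (fun b i =>
        (PySem.List.pyRange (i + 4) (min (i + 10) (PySem.Str.len image) + 1) 1).foldl (fun b j =>
          pvBestStep b (PySem.Str.slice image (some i) (some j))) b) none
      = (pvPrios image).min? := by
    rw [show pvPrios image = (pvWindows image).filterMap pvKwPrio.get? from rfl, ← pv_best_none]
    unfold pvWindows
    rw [pv_foldl_flatMap]
    simp only [List.foldl_map]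
  rw [hfold]
  by_cases h0 : pvGroupDB.any (fun db => PySem.Str.isIn db image) = true
  · have hmin : (pvPrios image).min? = some 0 := by
      rw [List.min?_eq_some_iff]
      exact ⟨(pv_mem_prios image 0).mpr (Or.inl ⟨rfl, h0⟩), fun b hb => pv_nonneg_prios image b hb⟩
    rw [if_pos h0, hmin]
    decide
  · by_cases h1 : pvGroupMQ.any (fun mq => PySem.Str.isIn mq image) = true
    · have hmin : (pvPrios image).min? = some 1 := by
        rw [List.min?_eq_some_iff]
        refine ⟨(pv_mem_prios image 1).mpr (Or.inr (Or.inl ⟨rfl, h1⟩)), fun b hb => ?_⟩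
        rcases (pv_mem_prios image b).mp hb with ⟨rfl, hc⟩ | ⟨rfl, -⟩ | ⟨rfl, -⟩ | ⟨rfl, -⟩
        · exact absurd hc h0
        · norm_num
        · norm_num
        · norm_num
      rw [if_neg h0, if_pos h1, hmin]
      decide
    · by_cases h2 : pvGroupWEB.any (fun web => PySem.Str.isIn web image) = true
      · have hmin : (pvPrios image).min? = some 2 := by
          rw [List.min?_eq_some_iff]
          refine ⟨(pv_mem_prios image 2).mpr (Or.inr (Or.inr (Or.inl ⟨rfl, h2⟩))), fun b hb => ?_⟩
          rcases (pv_mem_prios image b).mp hb with ⟨rfl, hc⟩ | ⟨rfl, hc⟩ | ⟨rfl, -⟩ | ⟨rfl, -⟩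
          · exact absurd hc h0
          · exact absurd hc h1
          · norm_num
          · norm_num
        rw [if_neg h0, if_neg h1, if_pos h2, hmin]
        decide
      · by_cases h3 : pvGroupMON.any (fun mon => PySem.Str.isIn mon image) = true
        · have hmin : (pvPrios image).min? = some 3 := by
            rw [List.min?_eq_some_iff]
            refine ⟨(pv_mem_prios image 3).mpr (Or.inr (Or.inr (Or.inr ⟨rfl, h3⟩))), fun b hb => ?_⟩
            rcases (pv_mem_prios image b).mp hb with ⟨rfl, hc⟩ | ⟨rfl, hc⟩ | ⟨rfl, hc⟩ | ⟨rfl, -⟩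
            · exact absurd hc h0
            · exact absurd hc h1
            · exact absurd hc h2
            · norm_num
          rw [if_neg h0, if_neg h1,
            if_neg h2, if_pos h3, hmin]
          decide
        · have hnil : pvPrios image = [] := by
            rw [List.eq_nil_iff_forall_not_mem]
            intro b hb
            rcases (pv_mem_prios image b).mp hb with ⟨-, hc⟩ | ⟨-, hc⟩ | ⟨-, hc⟩ | ⟨-, hc⟩
            exacts [h0 hc, h1 hc, h2 hc, h3 hc]
          rw [if_neg h0, if_neg h1,
            if_neg h2, if_neg h3, hnil]
          decide
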